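-- pv_equiv track=rewrite | github.com/seniverse/ucumex | priv/units.py | formatUnit
-- ===== SOURCE A (Python) =====
-- def formatUnit(unit):
--     escaped = [('[', '\\['), (']', '\\]'), ('/', '\\/'), ('(', '\\('), (')', '\\)'), ('*', '\\*'), ('+', '\\+'), ('.', '\\.'), ('^', '\\^')]
--
--     for (s, t) in escaped:
--         unit = unit.replace(s, t)
--
--
--     if len(unit) == 1:
--         return unit
--     else:
--         return '(%s)' % unit
-- ===== SOURCE B (Python) =====
-- def formatUnit(unit):
--     result = ''.join('\\' + c if c in '[]/()*+.^' else c for c in unit)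
--     if len(result) == 1:
--         return result
--     else:
--         return '(%s)' % result
-- ===== Notes on version B (the rewrite author's own statement) =====
-- stated objective: idiomatic
-- what changed: Replaces nine successive full-string str.replace passes by a single character-level pass that emits '\'+c for each of the 9 special characters and c otherwise, joined once.
import Mathlib
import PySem

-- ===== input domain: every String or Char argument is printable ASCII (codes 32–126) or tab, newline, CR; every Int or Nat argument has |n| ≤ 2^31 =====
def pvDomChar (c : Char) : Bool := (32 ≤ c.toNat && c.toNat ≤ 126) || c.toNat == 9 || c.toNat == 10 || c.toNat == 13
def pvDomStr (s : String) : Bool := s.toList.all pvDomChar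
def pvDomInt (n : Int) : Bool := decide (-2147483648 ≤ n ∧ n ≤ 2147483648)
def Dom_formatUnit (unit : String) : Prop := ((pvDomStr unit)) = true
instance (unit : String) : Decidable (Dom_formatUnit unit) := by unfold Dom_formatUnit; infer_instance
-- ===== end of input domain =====

-- B replaces A's nine successive full-string replace passes by one character-level
-- pass over the string (idiomatic single pass; same return value everywhere).

-- ===== PORT A =====
-- the `escaped` table of A, as (pattern, replacement) pairs
def pvEscaped : List (String × String) :=
  [("[", "\\["), ("]", "\\]"), ("/", "\\/"), ("(", "\\("), (")", "\\)"),
   ("*", "\\*"), ("+", "\\+"), (".", "\\."), ("^", "\\^")]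

def formatUnit (unit : String) : String :=
  -- for (s, t) in escaped: unit = unit.replace(s, t)
  let u := pvEscaped.foldl (fun u st => PySem.Str.replace u st.1 st.2) unit
  -- '(%s)' % unit is string concatenation
  if PySem.Str.len u = 1 then u else "(" ++ u ++ ")"

-- ===== PORT B =====
-- `c in '[]/()*+.^'` for a single character c is membership in these characters (exact)
def pvSpecials : List Char := ['[', ']', '/', '(', ')', '*', '+', '.', '^']

def formatUnit_alt (unit : String) : String :=
  -- ''.join('\\' + c if c in '[]/()*+.^' else c for c in unit)
  let r := unit.toList.flatMap (fun c => if c ∈ pvSpecials then ['\\', c] else [c])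
  if r.length = 1 then String.ofList r else "(" ++ String.ofList r ++ ")"

-- ===== PRECONDITION & SPEC =====
def Spec_formatUnit (unit : String) (out : String) : Prop := out = formatUnit_alt unit
instance (unit : String) (out : String) : Decidable (Spec_formatUnit unit out) := by unfold Spec_formatUnit; infer_instance

-- ===== CLAIM (what is proved, stated in full; the proofs are below) =====
def Claim_equal_formatUnit : Prop := ∀ (unit : String), Dom_formatUnit unit → Spec_formatUnit unit (formatUnit unit)

-- ===== LEMMAS AND PROOFS =====

-- single-character replace is a per-character flatMap
theorem go_single (c : Char) (new : List Char) :
    ∀ (fuel : Nat) (l acc : List Char), l.length ≤ fuel →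
      PySem.Chars.replace.go [c] new fuel l acc
        = acc.reverse ++ l.flatMap (fun ch => if ch = c then new else [ch]) := by
  intro fuel
  induction fuel with
  | zero =>
    intro l acc h
    have : l = [] := List.eq_nil_of_length_eq_zero (Nat.le_zero.mp h)
    subst this
    simp [PySem.Chars.replace.go]
  | succ n ih =>
    intro l acc h
    cases l with
    | nil => simp [PySem.Chars.replace.go]
    | cons ch t =>
      by_cases hc : ch = c
      · subst hc
        have hpre : List.isPrefixOf [ch] (ch :: t) = true := by
          simp [List.isPrefixOf]
        simp only [PySem.Chars.replace.go, hpre, if_true]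
        rw [show List.drop [ch].length (ch :: t) = t from rfl,
            ih t (new.reverse ++ acc) (Nat.le_of_succ_le_succ (by simpa using h))]
        simp
      · have hpre : List.isPrefixOf [c] (ch :: t) = false := by
          simpa [List.isPrefixOf] using Ne.symm hc
        simp only [PySem.Chars.replace.go, hpre, Bool.false_eq_true, if_false]
        rw [ih t (ch :: acc) (Nat.le_of_succ_le_succ (by simpa using h))]
        simp [hc]

theorem replace_single (s : List Char) (c : Char) (new : List Char) :
    PySem.Chars.replace s [c] new
      = s.flatMap (fun ch => if ch = c then new else [ch]) := by
  simp only [PySem.Chars.replace, List.isEmpty_cons, Bool.false_eq_true, if_false]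
  simpa using go_single c new s.length s [] (Nat.le_refl _)

-- the nine cascaded replaces equal the single escaping pass, on the char list
theorem foldl_escaped_eq (unit : String) :
    (pvEscaped.foldl (fun u st => PySem.Str.replace u st.1 st.2) unit).toList
      = unit.toList.flatMap (fun c => if c ∈ pvSpecials then ['\\', c] else [c]) := by
  have ea0 : ("[" : String).toList = ['['] := by decide
  have eb0 : ("\\[" : String).toList = ['\\', '['] := by decide
  have ea1 : ("]" : String).toList = [']'] := by decide
  have eb1 : ("\\]" : String).toList = ['\\', ']'] := by decide
  have ea2 : ("/" : String).toList = ['/'] := by decide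
  have eb2 : ("\\/" : String).toList = ['\\', '/'] := by decide
  have ea3 : ("(" : String).toList = ['('] := by decide
  have eb3 : ("\\(" : String).toList = ['\\', '('] := by decide
  have ea4 : (")" : String).toList = [')'] := by decide
  have eb4 : ("\\)" : String).toList = ['\\', ')'] := by decide
  have ea5 : ("*" : String).toList = ['*'] := by decide
  have eb5 : ("\\*" : String).toList = ['\\', '*'] := by decide
  have ea6 : ("+" : String).toList = ['+'] := by decide
  have eb6 : ("\\+" : String).toList = ['\\', '+'] := by decide
  have ea7 : ("." : String).toList = ['.'] := by decide
  have eb7 : ("\\." : String).toList = ['\\', '.'] := by decide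
  have ea8 : ("^" : String).toList = ['^'] := by decide
  have eb8 : ("\\^" : String).toList = ['\\', '^'] := by decide
  simp only [pvEscaped, List.foldl_cons, List.foldl_nil, PySem.Str.toList_replace,
    ea0, eb0, ea1, eb1, ea2, eb2, ea3, eb3, ea4, eb4, ea5, eb5, ea6, eb6, ea7, eb7, ea8, eb8]
  rw [replace_single, replace_single, replace_single, replace_single, replace_single,
      replace_single, replace_single, replace_single, replace_single]
  simp only [List.flatMap_assoc]
  refine List.flatMap_congr ?_
  intro ch _
  by_cases h1 : ch = '[' <;> by_cases h2 : ch = ']' <;> by_cases h3 : ch = '/' <;>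
    by_cases h4 : ch = '(' <;> by_cases h5 : ch = ')' <;> by_cases h6 : ch = '*' <;>
    by_cases h7 : ch = '+' <;> by_cases h8 : ch = '.' <;> by_cases h9 : ch = '^' <;>
    simp_all [pvSpecials]

-- ===== VERDICT (by name: the statement is the Claim_ definition above) =====
theorem formatUnit_spec : Claim_equal_formatUnit := by
  intro unit _
  unfold Spec_formatUnit formatUnit formatUnit_alt
  set r := unit.toList.flatMap (fun c => if c ∈ pvSpecials then ['\\', c] else [c]) with hr
  have hrep : (pvEscaped.foldl (fun u st => PySem.Str.replace u st.1 st.2) unit).toList = r :=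
    foldl_escaped_eq unit
  have hlen : (PySem.Str.len (pvEscaped.foldl (fun u st => PySem.Str.replace u st.1 st.2) unit) : Int)
      = (r.length : Int) := by
    rw [PySem.Str.len_eq, hrep]
  by_cases h : r.length = 1
  · simp only [hlen, h, Nat.cast_one, if_true]
    exact String.toList_inj.mp (by simp [hrep])
  · have hne : ¬ ((PySem.Str.len (pvEscaped.foldl (fun u st => PySem.Str.replace u st.1 st.2) unit) : Int) = 1) := by
      rw [hlen]; exact_mod_cast h
    simp only [hne, h, if_false]
    exact String.toList_inj.mp (by simp [hrep])
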